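-- pv_equiv track=rewrite | github.com/zc579/cs6120_hw | task3/test_lvn(4).py | if_overwritten
-- ===== SOURCE A (Python) =====
-- def if_overwritten(instrs):
--     size=len(instrs)
--     exist=set()
--     res=[0]*size
--     index=size-1
--     for instr in instrs[::-1]:
--         if 'dest' in instr and instr['dest'] not in exist:
--             exist.add(instr['dest'])
--             res[index]=1
--         index-=1
--     return res
-- ===== SOURCE B (Python) =====
-- def if_overwritten(instrs):
--     last = {}
--     for i, instr in enumerate(instrs):
--         if 'dest' in instr:
--             last[instr['dest']] = i
--     return [1 if 'dest' in instr and last[instr['dest']] == i else 0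
--             for i, instr in enumerate(instrs)]
-- ===== Notes on version B (the rewrite author's own statement) =====
-- stated objective: alternative
-- what changed: Replaces the reverse scan with a membership set and in-place index writes by a forward two-phase pass: build a dict mapping each dest to its last index, then emit the 0/1 list by comparing each position with the table.
import Mathlib
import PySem

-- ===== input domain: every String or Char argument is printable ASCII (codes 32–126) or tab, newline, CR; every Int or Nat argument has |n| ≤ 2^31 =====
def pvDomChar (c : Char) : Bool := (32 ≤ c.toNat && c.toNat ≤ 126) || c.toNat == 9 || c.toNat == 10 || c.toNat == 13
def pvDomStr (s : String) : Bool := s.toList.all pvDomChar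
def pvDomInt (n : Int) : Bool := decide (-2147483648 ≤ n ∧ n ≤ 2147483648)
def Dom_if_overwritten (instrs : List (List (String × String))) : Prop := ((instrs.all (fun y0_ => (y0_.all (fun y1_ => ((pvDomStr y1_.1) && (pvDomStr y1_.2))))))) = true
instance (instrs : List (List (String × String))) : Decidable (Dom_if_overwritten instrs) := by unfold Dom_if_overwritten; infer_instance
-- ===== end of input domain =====

-- B replaces A's reverse scan (seen-set + in-place writes at a descending index) by a forward
-- two-phase pass: build a last-index table per dest, then emit the 0/1 list positionally.

-- ===== PORT A =====
-- convention lookup for the instr dicts (assoc list, first match): instr['dest'] / 'dest' in instr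
def pvDest (ins : List (String × String)) : Option String :=
  (ins.find? (fun p => p.1 == "dest")).map Prod.snd

-- A's reverse loop, threading its state (exist, res, index)
def pvLoopA : List (List (String × String)) → PySem.Set String → List Int → Int →
    PySem.Set String × List Int × Int
  | [], exist, res, index => (exist, res, index)
  | instr :: rest, exist, res, index =>
    match pvDest instr with
    | some v =>
      if PySem.Set.contains exist v then pvLoopA rest exist res (index - 1)
      else pvLoopA rest (PySem.Set.add exist v) (PySem.List.pySetD res index (1 : Int)) (index - 1)
    | none => pvLoopA rest exist res (index - 1)

def if_overwritten (instrs : List (List (String × String))) : List Int :=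
  let size : Int := instrs.length
  let exist : PySem.Set String := PySem.Set.empty
  let res : List Int := List.replicate instrs.length (0 : Int)
  ((pvLoopA ((PySem.List.slice? instrs none none (-1)).getD []) exist res (size - 1)).2).1

-- ===== PORT B =====
-- first pass: dict mapping each dest to the index of its last write
def pvLastTable (instrs : List (List (String × String))) : PySem.Dict String Int :=
  (PySem.List.enumerate instrs).foldl
    (fun last p =>
      match pvDest p.2 with
      | some v => PySem.Dict.insert last v p.1
      | none => last)
    PySem.Dict.empty

def if_overwritten_alt (instrs : List (List (String × String))) : List Int :=
  let last := pvLastTable instrs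
  (PySem.List.enumerate instrs).map
    (fun p =>
      match pvDest p.2 with
      | some v => if PySem.Dict.get? last v == some p.1 then (1 : Int) else 0
      | none => 0)

-- ===== PRECONDITION & SPEC =====
def Spec_if_overwritten (instrs : List (List (String × String))) (out : List Int) : Prop := out = if_overwritten_alt instrs
instance (instrs : List (List (String × String))) (out : List Int) : Decidable (Spec_if_overwritten instrs out) := by unfold Spec_if_overwritten; infer_instance

-- ===== CLAIM (what is proved, stated in full; the proofs are below) =====
def Claim_equal_if_overwritten : Prop := ∀ (instrs : List (List (String × String))), Dom_if_overwritten instrs → Spec_if_overwritten instrs (if_overwritten instrs)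

-- ===== LEMMAS AND PROOFS =====

-- the marked list, stated positionally: position gets 1 iff it has a dest with no later write to it
def pvCanon : List (List (String × String)) → List Int
  | [] => []
  | x :: t =>
    (match pvDest x with
     | some v =>
       if v ∈ t.filterMap (fun ins => pvDest ins) then (0 : Int) else 1
     | none => (0 : Int)) :: pvCanon t

-- index of the last element of l whose dest is v (relative, 0-based), none if no such element
def pvLastPos : List (List (String × String)) → String → Option Int
  | [], _ => none
  | x :: t, v =>
    match pvLastPos t v with
    | some k => some (k + 1)
    | none => if pvDest x = some v then some 0 else none

lemma pvLastPos_nonneg (l : List (List (String × String))) (v : String) (k : Int)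
    (h : pvLastPos l v = some k) : 0 ≤ k := by
  induction l generalizing k with
  | nil => simp [pvLastPos] at h
  | cons x t ih =>
    simp only [pvLastPos] at h
    cases hh : pvLastPos t v with
    | some k' =>
      rw [hh] at h
      simp only [Option.some.injEq] at h
      have := ih k' hh
      omega
    | none =>
      rw [hh] at h
      split at h <;> simp_all

lemma pvLastPos_eq_none_iff (l : List (List (String × String))) (v : String) :
    pvLastPos l v = none ↔ v ∉ l.filterMap (fun ins => pvDest ins) := by
  induction l with
  | nil => simp [pvLastPos]
  | cons x t ih =>
    simp only [pvLastPos, List.filterMap_cons]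
    cases hh : pvLastPos t v with
    | some k =>
      dsimp only
      have hv : v ∈ List.filterMap (fun ins => pvDest ins) t := by
        by_contra hc
        rw [← ih] at hc
        simp [hc] at hh
      cases hx : pvDest x <;> simp [hv]
    | none =>
      dsimp only
      have hv : v ∉ List.filterMap (fun ins => pvDest ins) t := ih.mp hh
      cases hx : pvDest x with
      | none => simp [hv]
      | some w => by_cases hw : w = v <;> simp [hw, hv, eq_comm]

-- ===== A-side =====

lemma pvLoopA_mem_exist (rev : List (List (String × String))) (E : PySem.Set String)
    (res : List Int) (i : Int) (v : String) :
    v ∈ (pvLoopA rev E res i).1 ↔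
      v ∈ E ∨ v ∈ rev.filterMap (fun ins => pvDest ins) := by
  induction rev generalizing E res i with
  | nil => simp [pvLoopA]
  | cons ins rest ih =>
    simp only [pvLoopA, List.filterMap_cons]
    cases hd : pvDest ins with
    | none => dsimp only; rw [ih]
    | some w =>
      dsimp only
      by_cases hc : PySem.Set.contains E w
      · rw [if_pos hc, ih]
        have hw : w ∈ E := (PySem.Set.contains_iff E w).mp hc
        constructor
        · rintro (h | h)
          · exact Or.inl h
          · exact Or.inr (List.mem_cons_of_mem _ h)
        · rintro (h | h)
          · exact Or.inl h
          · rcases List.mem_cons.mp h with h | h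
            · exact Or.inl (h ▸ hw)
            · exact Or.inr h
      · rw [if_neg hc, ih]
        rw [PySem.Set.mem_add]
        constructor
        · rintro ((h | h) | h)
          · exact Or.inl h
          · exact Or.inr (by rw [h]; exact List.mem_cons_self)
          · exact Or.inr (List.mem_cons_of_mem _ h)
        · rintro (h | h)
          · exact Or.inl (Or.inl h)
          · rcases List.mem_cons.mp h with h | h
            · exact Or.inl (Or.inr h)
            · exact Or.inr h

lemma pvLoopA_idx (rev : List (List (String × String))) (E : PySem.Set String)
    (res : List Int) (i : Int) : (pvLoopA rev E res i).2.2 = i - rev.length := by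
  induction rev generalizing E res i with
  | nil => simp [pvLoopA]
  | cons ins rest ih =>
    simp only [pvLoopA]
    cases hd : pvDest ins with
    | none => dsimp only; rw [ih]; simp only [List.length_cons]; push_cast; ring
    | some w =>
      dsimp only
      by_cases hc : PySem.Set.contains E w
      · rw [if_pos hc, ih]; simp only [List.length_cons]; push_cast; ring
      · rw [if_neg hc, ih]; simp only [List.length_cons]; push_cast; ring

lemma pvLoopA_append (a b : List (List (String × String))) (E : PySem.Set String)
    (res : List Int) (i : Int) :
    pvLoopA (a ++ b) E res i =
      pvLoopA b (pvLoopA a E res i).1 (pvLoopA a E res i).2.1 (pvLoopA a E res i).2.2 := by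
  induction a generalizing E res i with
  | nil => simp [pvLoopA]
  | cons ins rest ih =>
    simp only [List.cons_append, pvLoopA]
    cases hd : pvDest ins with
    | none => dsimp only; exact ih _ _ _
    | some w =>
      dsimp only
      by_cases hc : PySem.Set.contains E w
      · simp only [if_pos hc]; exact ih _ _ _
      · simp only [if_neg hc]; exact ih _ _ _

lemma pvLoopA_shift (rev : List (List (String × String))) (E : PySem.Set String)
    (r0 : Int) (res : List Int) (i : Int) (h : (rev.length : Int) ≤ i + 1) :
    (pvLoopA rev E (r0 :: res) (i + 1)).2.1 = r0 :: (pvLoopA rev E res i).2.1 := by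
  induction rev generalizing E res i with
  | nil => simp [pvLoopA]
  | cons ins rest ih =>
    have hlen : (rest.length : Int) ≤ i := by
      simp only [List.length_cons] at h; push_cast at h; omega
    have hi : (0 : Int) ≤ i := le_trans (Int.natCast_nonneg _) hlen
    have e : i + 1 - 1 = (i - 1) + 1 := by ring
    have h' : (rest.length : Int) ≤ (i - 1) + 1 := by omega
    simp only [pvLoopA]
    cases hd : pvDest ins with
    | none => dsimp only; rw [e, ih _ _ _ h']
    | some w =>
      dsimp only
      by_cases hc : PySem.Set.contains E w
      · simp only [if_pos hc]; rw [e, ih _ _ _ h']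
      · simp only [if_neg hc]
        have hset : PySem.List.pySetD (r0 :: res) (i + 1) (1 : Int)
            = r0 :: PySem.List.pySetD res i (1 : Int) := by
          rw [PySem.List.pySetD_of_nonneg _ _ (by omega), PySem.List.pySetD_of_nonneg _ _ hi]
          have : (i + 1).toNat = i.toNat + 1 := by omega
          rw [this, List.set_cons_succ]
        rw [hset, e, ih _ _ _ h']

lemma pvLoopA_main (l : List (List (String × String))) (E : PySem.Set String)
    (hE : ∀ v, v ∈ l.filterMap (fun ins => pvDest ins) → v ∉ E) :
    (pvLoopA l.reverse E (List.replicate l.length (0 : Int)) ((l.length : Int) - 1)).2.1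
      = pvCanon l := by
  induction l with
  | nil => simp [pvLoopA, pvCanon]
  | cons x t ih =>
    have hrev : (x :: t).reverse = t.reverse ++ [x] := by simp
    have hrep : List.replicate (x :: t).length (0 : Int)
        = 0 :: List.replicate t.length (0 : Int) := rfl
    have hidx : ((x :: t).length : Int) - 1 = ((t.length : Int) - 1) + 1 := by
      simp only [List.length_cons]; push_cast; ring
    rw [hrev, hrep, hidx, pvLoopA_append]
    have hsh := pvLoopA_shift t.reverse E 0 (List.replicate t.length (0 : Int))
      ((t.length : Int) - 1) (by simp)
    have hix := pvLoopA_idx t.reverse E (0 :: List.replicate t.length (0 : Int))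
      (((t.length : Int) - 1) + 1)
    have hix0 : (pvLoopA t.reverse E (0 :: List.replicate t.length (0 : Int))
        (((t.length : Int) - 1) + 1)).2.2 = 0 := by
      rw [hix]; simp
    have hIH := ih (fun v hv => hE v (by
      simp only [List.filterMap_cons]
      cases hx : pvDest x
      · exact hv
      · exact List.mem_cons_of_mem _ hv))
    set X := (pvLoopA t.reverse E (0 :: List.replicate t.length (0 : Int))
        (((t.length : Int) - 1) + 1)).1 with hX
    rw [hix0, hsh, hIH]
    have hmemX : ∀ v, v ∈ X ↔ v ∈ E ∨ v ∈ t.filterMap (fun ins => pvDest ins) := by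
      intro v
      rw [hX, pvLoopA_mem_exist]
      rw [List.filterMap_reverse, List.mem_reverse]
    simp only [pvLoopA, pvCanon]
    cases hd : pvDest x with
    | none => rfl
    | some v =>
      dsimp only
      by_cases hmem : v ∈ t.filterMap (fun ins => pvDest ins)
      · have hc : PySem.Set.contains X v = true := by
          rw [PySem.Set.contains_iff, hmemX]; exact Or.inr hmem
        rw [if_pos hc, if_pos hmem]
      · have hnE : v ∉ E := hE v (by
          simp only [List.filterMap_cons, hd]; exact List.mem_cons_self)
        have hc : ¬ PySem.Set.contains X v = true := by
          rw [PySem.Set.contains_iff, hmemX]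
          rintro (h | h)
          · exact hnE h
          · exact hmem h
        rw [if_neg hc, if_neg hmem]
        rw [PySem.List.pySetD_of_nonneg _ _ le_rfl]
        rfl

lemma a_eq_canon (instrs : List (List (String × String))) :
    if_overwritten instrs = pvCanon instrs := by
  unfold if_overwritten
  rw [PySem.List.slice?_none_none_neg_one]
  simp only [Option.getD_some]
  exact pvLoopA_main instrs PySem.Set.empty (fun v _ h => by simp [PySem.Set.empty] at h)

-- ===== B-side =====

lemma get?_lastTable_aux (l : List (List (String × String))) (s : Int)
    (d : PySem.Dict String Int) (v : String) :
    PySem.Dict.get?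
      ((PySem.List.enumerate l s).foldl
        (fun last p =>
          match pvDest p.2 with
          | some w => PySem.Dict.insert last w p.1
          | none => last) d) v
      = match pvLastPos l v with
        | some k => some (s + k)
        | none => PySem.Dict.get? d v := by
  induction l generalizing s d with
  | nil => simp [PySem.List.enumerate_nil, pvLastPos]
  | cons x t ih =>
    rw [PySem.List.enumerate_cons]
    simp only [List.foldl_cons, pvLastPos]
    cases hd : pvDest x with
    | none =>
      dsimp only
      rw [ih]
      cases hp : pvLastPos t v with
      | some k => dsimp only; congr 1; ring
      | none => dsimp only; simp
    | some w =>
      dsimp only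
      rw [ih]
      cases hp : pvLastPos t v with
      | some k => dsimp only; congr 1; ring
      | none =>
        dsimp only
        by_cases hw : w = v
        · subst hw
          rw [PySem.Dict.get?_insert_self]
          simp
        · rw [PySem.Dict.get?_insert_of_ne _ _ (Ne.symm hw)]
          have hne : ¬ (some w = some v) := by simpa using hw
          rw [if_neg hne]

lemma b_main (l : List (List (String × String))) (s : Int) (D : PySem.Dict String Int)
    (H : ∀ v (j : Int), 0 ≤ j →
      (PySem.Dict.get? D v = some (s + j) ↔ pvLastPos l v = some j)) :
    (PySem.List.enumerate l s).map
      (fun p =>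
        match pvDest p.2 with
        | some v => if PySem.Dict.get? D v == some p.1 then (1 : Int) else 0
        | none => 0)
      = pvCanon l := by
  induction l generalizing s with
  | nil => simp [PySem.List.enumerate_nil, pvCanon]
  | cons x t ih =>
    rw [PySem.List.enumerate_cons]
    simp only [List.map_cons, pvCanon]
    have H' : ∀ v (j : Int), 0 ≤ j →
        (PySem.Dict.get? D v = some ((s + 1) + j) ↔ pvLastPos t v = some j) := by
      intro v j hj
      have h1 := H v (j + 1) (by omega)
      have e : s + (j + 1) = (s + 1) + j := by ring
      rw [e] at h1
      rw [h1]
      simp only [pvLastPos]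
      cases hp : pvLastPos t v with
      | some k =>
        dsimp only
        simp only [Option.some.injEq]
        omega
      | none =>
        dsimp only
        constructor
        · intro h
          split at h
          · simp only [Option.some.injEq] at h; omega
          · exact absurd h (by simp)
        · intro h; simp at h
    rw [ih (s + 1) H']
    congr 1
    cases hd : pvDest x with
    | none => dsimp only
    | some v =>
      dsimp only
      have h0 := H v 0 le_rfl
      rw [add_zero] at h0
      have hiff : pvLastPos (x :: t) v = some 0 ↔ pvLastPos t v = none := by
        simp only [pvLastPos]
        cases hp : pvLastPos t v with
        | some k =>
          dsimp only
          have := pvLastPos_nonneg t v k hp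
          simp only [Option.some.injEq]
          constructor
          · intro h; omega
          · intro h; exact absurd h (by simp)
        | none => dsimp only; simp [hd]
      by_cases hmem : v ∈ t.filterMap (fun ins => pvDest ins)
      · have hnone : ¬ pvLastPos t v = none := by
          rw [pvLastPos_eq_none_iff]; exact fun h => h hmem
        have : ¬ (PySem.Dict.get? D v == some s) = true := by
          rw [beq_iff_eq, h0]
          intro h
          exact hnone (hiff.mp (by simpa [pvLastPos] using h))
        rw [if_neg this, if_pos hmem]
      · have hnone : pvLastPos t v = none := (pvLastPos_eq_none_iff t v).mpr hmem
        have : (PySem.Dict.get? D v == some s) = true := by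
          rw [beq_iff_eq, h0]
          exact hiff.mpr hnone
        rw [if_pos this, if_neg hmem]

lemma b_eq_canon (instrs : List (List (String × String))) :
    if_overwritten_alt instrs = pvCanon instrs := by
  unfold if_overwritten_alt
  apply b_main
  intro v j hj
  unfold pvLastTable
  rw [get?_lastTable_aux]
  cases hp : pvLastPos instrs v with
  | some k =>
    dsimp only
    simp only [Option.some.injEq]
    omega
  | none => dsimp only; simp

-- ===== VERDICT (by name: the statement is the Claim_ definition above) =====
theorem if_overwritten_spec : Claim_equal_if_overwritten := by
  intro instrs _
  unfold Spec_if_overwritten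
  rw [a_eq_canon, b_eq_canon]
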